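-- pv_equiv track=rewrite | github.com/NishkaArora/multi_agent_planner_nuplan | tutorials/Fixing LQR Simulation/lqrdata.py | pad_both_sides
-- ===== SOURCE A (Python) =====
-- def pad_both_sides(arr):
--     # forward
--     last = (None, None)
--     for idx in range(len(arr)):
--         if arr[idx] != (None, None):
--             last = arr[idx]
--         else:
--             arr[idx] = last
--
--     # no values in array
--     if last == (None, None):
--         return -1
--
--     # backward
--     last = (None, None)
--     for idx in range(len(arr)-1, -1, -1):
--         if arr[idx] != (None, None):
--             last = arr[idx]
--         else:
--             arr[idx] = last
--     return arr
-- ===== SOURCE B (Python) =====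
-- def pad_both_sides(arr):
--     # find the first real value; if there is none, behave like the original (-1)
--     first = next((x for x in arr if x != (None, None)), None)
--     if first is None:
--         return -1
--     # single forward pass: leading gaps get the first value, later gaps the preceding value
--     last = first
--     for i in range(len(arr)):
--         if arr[i] == (None, None):
--             arr[i] = last
--         else:
--             last = arr[i]
--     return arr
-- ===== Notes on version B (the rewrite author's own statement) =====
-- stated objective: simpler
-- what changed: Replaces A's two mutation passes (forward fill, then a backward pass to fix leading gaps) by a pre-scan for the first non-(None,None) value followed by a single forward fill seeded with that value.
-- outside the precondition, e.g. on pad_both_sides([(None, None)]): A returns -1, B returns -1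
import Mathlib
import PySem

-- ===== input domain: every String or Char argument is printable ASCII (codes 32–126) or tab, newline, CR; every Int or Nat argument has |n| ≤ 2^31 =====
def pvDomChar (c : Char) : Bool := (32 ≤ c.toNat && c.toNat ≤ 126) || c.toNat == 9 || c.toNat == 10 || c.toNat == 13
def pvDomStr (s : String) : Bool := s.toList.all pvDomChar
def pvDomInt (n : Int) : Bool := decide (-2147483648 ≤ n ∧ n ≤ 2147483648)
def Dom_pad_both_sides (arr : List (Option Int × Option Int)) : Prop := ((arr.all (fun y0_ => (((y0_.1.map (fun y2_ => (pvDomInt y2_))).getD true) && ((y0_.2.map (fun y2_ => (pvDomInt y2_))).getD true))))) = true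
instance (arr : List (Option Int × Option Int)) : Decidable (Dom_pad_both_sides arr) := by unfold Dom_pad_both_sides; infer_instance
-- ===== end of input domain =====

-- B replaces A's two in-place fill passes by a pre-scan for the first real value plus one
-- forward fill pass (objective: simpler). Both Pythons mutate arr in place and return it;
-- the equivalence proved here is about the RETURN value (the mutation is the same list).

-- ===== PORT A =====
-- A's forward loop: state is `last`; a non-(None,None) element updates `last`,
-- a (None,None) element is overwritten by `last`. Returns (new list, final last).
def pvFwdA (last : Option Int × Option Int) :
    List (Option Int × Option Int) → List (Option Int × Option Int) × (Option Int × Option Int)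
  | [] => ([], last)
  | x :: xs =>
    if x ≠ ((none, none) : Option Int × Option Int) then
      let r := pvFwdA x xs
      (x :: r.1, r.2)
    else
      let r := pvFwdA last xs
      (last :: r.1, r.2)

-- A: forward pass; return -1 (= none) if no value was seen; else the backward pass,
-- rendered as the same loop over the reversed list, reversed back.
def pad_both_sides (arr : List (Option Int × Option Int)) : Option (List (Option Int × Option Int)) :=
  let f := pvFwdA ((none, none)) arr
  if f.2 = ((none, none) : Option Int × Option Int) then none
  else
    let b := pvFwdA ((none, none)) f.1.reverse
    some b.1.reverse

-- ===== PORT B =====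
-- B's single fill pass, seeded with `last`.
def pvFillB (last : Option Int × Option Int) :
    List (Option Int × Option Int) → List (Option Int × Option Int)
  | [] => []
  | x :: xs =>
    if x = ((none, none) : Option Int × Option Int) then last :: pvFillB last xs
    else x :: pvFillB x xs

def pad_both_sides_alt (arr : List (Option Int × Option Int)) : Option (List (Option Int × Option Int)) :=
  match arr.find? (fun x => decide (x ≠ ((none, none) : Option Int × Option Int))) with
  | none => none
  | some first => some (pvFillB first arr)

-- ===== PRECONDITION & SPEC =====
-- Pre_ excludes arrays with no element other than (None, None) (including the empty array):
-- there A returns -1, an int and not a list, so its result is not a value of the declared type.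
def Pre_pad_both_sides (arr : List (Option Int × Option Int)) : Prop :=
  ∃ x ∈ arr, x ≠ ((none, none) : Option Int × Option Int)
instance (arr : List (Option Int × Option Int)) : Decidable (Pre_pad_both_sides arr) := by
  unfold Pre_pad_both_sides; infer_instance

def pvWitness_pad_both_sides : (List (Option Int × Option Int)) := [((some 1 : Option Int), (none : Option Int))]

def Spec_pad_both_sides (arr : List (Option Int × Option Int)) (out : Option (List (Option Int × Option Int))) : Prop := out = pad_both_sides_alt arr
instance (arr : List (Option Int × Option Int)) (out : Option (List (Option Int × Option Int))) : Decidable (Spec_pad_both_sides arr out) := by unfold Spec_pad_both_sides; infer_instance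

-- ===== CLAIM (what is proved, stated in full; the proofs are below) =====
def Claim_equal_pad_both_sides : Prop := ∀ (arr : List (Option Int × Option Int)), Dom_pad_both_sides arr → Pre_pad_both_sides arr → Spec_pad_both_sides arr (pad_both_sides arr)

-- ===== LEMMAS AND PROOFS =====

-- abbreviation used only in the proofs
def pvNN : Option Int × Option Int := (none, none)

-- the forward loop distributes over append, threading the state
theorem pvFwdA_append (l : Option Int × Option Int) (xs ys : List (Option Int × Option Int)) :
    pvFwdA l (xs ++ ys) =
      ((pvFwdA l xs).1 ++ (pvFwdA (pvFwdA l xs).2 ys).1, (pvFwdA (pvFwdA l xs).2 ys).2) := by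
  induction xs generalizing l with
  | nil => simp [pvFwdA]
  | cons x xs ih =>
    by_cases h : x = pvNN <;> simp [pvFwdA, pvNN] at h ⊢ <;> simp [h, ih]

-- on an all-(none,none) list the loop writes `l` everywhere and keeps state `l`
theorem pvFwdA_all_nn (l : Option Int × Option Int) (xs : List (Option Int × Option Int))
    (h : ∀ x ∈ xs, x = pvNN) :
    pvFwdA l xs = (List.replicate xs.length l, l) := by
  induction xs with
  | nil => simp [pvFwdA]
  | cons x xs ih =>
    have hx : x = pvNN := h x (by simp)
    simp [pvFwdA, hx, pvNN, ih (fun y hy => h y (by simp [hy])), List.replicate_succ]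

-- with a non-(none,none) seed the loop computes exactly B's fill, and ends in a
-- non-(none,none) state
theorem pvFwdA_eq_fill (l : Option Int × Option Int) (xs : List (Option Int × Option Int))
    (hl : l ≠ pvNN) :
    (pvFwdA l xs).1 = pvFillB l xs ∧ (pvFwdA l xs).2 ≠ pvNN := by
  induction xs generalizing l with
  | nil => simpa [pvFwdA, pvFillB] using hl
  | cons x xs ih =>
    by_cases h : x = pvNN
    · simp [pvFwdA, pvFillB, h, pvNN] at hl ⊢
      simpa [pvNN] using ih l hl
    · simp [pvFwdA, pvFillB, pvNN] at h ⊢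
      have := ih x (by simpa [pvNN] using h)
      simpa [pvNN, h] using this
-- all elements written by the fill are non-(none,none) when the seed is
theorem pvFillB_all_ne (l : Option Int × Option Int) (xs : List (Option Int × Option Int))
    (hl : l ≠ pvNN) : ∀ y ∈ pvFillB l xs, y ≠ pvNN := by
  induction xs generalizing l with
  | nil => simp [pvFillB]
  | cons x xs ih =>
    intro y hy
    by_cases h : x = pvNN
    · simp only [pvFillB] at hy
      rw [if_pos (show x = ((none, none) : Option Int × Option Int) from h)] at hy
      rcases List.mem_cons.1 hy with rfl | hy
      · exact hl
      · exact ih l hl y hy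
    · simp only [pvFillB] at hy
      rw [if_neg (show ¬ x = ((none, none) : Option Int × Option Int) from h)] at hy
      rcases List.mem_cons.1 hy with rfl | hy
      · exact h
      · exact ih x h y hy

-- the loop leaves an all-non-(none,none) list ending in a real value unchanged,
-- and its state ends at that last value
theorem pvFwdA_all_ne (l : Option Int × Option Int) (xs : List (Option Int × Option Int))
    (f : Option Int × Option Int) (h : ∀ x ∈ xs, x ≠ pvNN) (hf : f ≠ pvNN) :
    pvFwdA l (xs ++ [f]) = (xs ++ [f], f) := by
  induction xs generalizing l with
  | nil =>
    simp [pvFwdA, show ¬ f = ((none, none) : Option Int × Option Int) from hf]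
  | cons x xs ih =>
    have hx : x ≠ pvNN := h x (by simp)
    simp [pvFwdA, show ¬ x = ((none, none) : Option Int × Option Int) from hx,
      ih x (fun y hy => h y (by simp [hy]))]

-- B's fill over an all-(none,none) prefix
theorem pvFillB_nn_prefix (l : Option Int × Option Int)
    (pre ys : List (Option Int × Option Int)) (h : ∀ x ∈ pre, x = pvNN) :
    pvFillB l (pre ++ ys) = List.replicate pre.length l ++ pvFillB l ys := by
  induction pre with
  | nil => simp
  | cons x xs ih =>
    have hx : x = pvNN := h x (by simp)
    simp [pvFillB, hx, pvNN, ih (fun y hy => h y (by simp [hy])), List.replicate_succ]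

-- find? skips the all-(none,none) prefix and returns the first real value
theorem pvFind_split (pre rest : List (Option Int × Option Int))
    (f : Option Int × Option Int) (hpre : ∀ x ∈ pre, x = pvNN) (hf : f ≠ pvNN) :
    (pre ++ f :: rest).find? (fun x => decide (x ≠ ((none, none) : Option Int × Option Int)))
      = some f := by
  induction pre with
  | nil =>
    simp [show ¬ f = ((none, none) : Option Int × Option Int) from hf]
  | cons x xs ih =>
    rw [List.cons_append]
    simp only [List.find?_cons,
      show x = ((none, none) : Option Int × Option Int) from hpre x (by simp),]
    exact ih (fun y hy => hpre y (by simp [hy]))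

-- any list satisfying Pre_ splits as all-(none,none) prefix ++ first real value ++ rest
theorem pv_split (arr : List (Option Int × Option Int)) (h : Pre_pad_both_sides arr) :
    ∃ pre f rest, arr = pre ++ f :: rest ∧ (∀ x ∈ pre, x = pvNN) ∧ f ≠ pvNN := by
  induction arr with
  | nil => simp [Pre_pad_both_sides] at h
  | cons x xs ih =>
    by_cases hx : x = pvNN
    · obtain ⟨y, hy, hyne⟩ := h
      rcases List.mem_cons.1 hy with rfl | hy
      · exact absurd (show y = ((none, none) : Option Int × Option Int) from hx) hyne
      · obtain ⟨pre, f, rest, e, hpre, hf⟩ := ih ⟨y, hy, hyne⟩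
        refine ⟨x :: pre, f, rest, by simp [e], ?_, hf⟩
        intro z hz
        rcases List.mem_cons.1 hz with rfl | hz
        · exact hx
        · exact hpre z hz
    · exact ⟨[], x, xs, rfl, by simp, hx⟩

theorem pad_main (arr : List (Option Int × Option Int)) (h : Pre_pad_both_sides arr) :
    pad_both_sides arr = pad_both_sides_alt arr := by
  obtain ⟨pre, f, rest, rfl, hpre, hf⟩ := pv_split arr h
  -- forward pass
  have h1 : pvFwdA pvNN pre = (pre, pvNN) := by
    rw [pvFwdA_all_nn pvNN pre hpre]
    have : pre = List.replicate pre.length pvNN := List.eq_replicate_of_mem hpre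
    exact congrArg (·, pvNN) this.symm
  have h2 := pvFwdA_eq_fill f rest hf
  have hfwd : pvFwdA pvNN (pre ++ f :: rest)
      = (pre ++ f :: pvFillB f rest, (pvFwdA f rest).2) := by
    rw [pvFwdA_append, h1]
    have : pvFwdA pvNN (f :: rest) = (f :: (pvFwdA f rest).1, (pvFwdA f rest).2) := by
      simp [pvFwdA, pvNN] at hf ⊢; simp [hf]
    simp [this, h2.1]
  -- backward pass input
  set t := pvFillB f rest with ht
  have hrev : (pre ++ f :: t).reverse = (t.reverse ++ [f]) ++ pre.reverse := by
    simp
  have hne : ∀ x ∈ t.reverse ++ [f], x ≠ pvNN := by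
    intro x hx
    rcases List.mem_append.1 hx with hx | hx
    · exact pvFillB_all_ne f rest hf x (List.mem_reverse.1 hx)
    · simp at hx; simpa [hx] using hf
  have h3 : pvFwdA pvNN (t.reverse ++ [f]) = (t.reverse ++ [f], f) :=
    pvFwdA_all_ne pvNN t.reverse f
      (fun x hx => pvFillB_all_ne f rest hf x (List.mem_reverse.1 hx)) hf
  have h4 : pvFwdA f pre.reverse = (List.replicate pre.length f, f) := by
    rw [pvFwdA_all_nn f _ (fun x hx => hpre x (List.mem_reverse.1 hx))]
    simp
  have hbwd : pvFwdA pvNN ((pre ++ f :: t).reverse)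
      = ((t.reverse ++ [f]) ++ List.replicate pre.length f, f) := by
    rw [hrev, pvFwdA_append, h3]
    simp [h4]
  -- assemble A
  have hA : pad_both_sides (pre ++ f :: rest)
      = some (List.replicate pre.length f ++ f :: t) := by
    unfold pad_both_sides
    rw [show ((none, none) : Option Int × Option Int) = pvNN from rfl, hfwd]
    rw [if_neg h2.2]
    rw [hbwd]
    simp [List.reverse_append]
  -- assemble B
  have hB : pad_both_sides_alt (pre ++ f :: rest)
      = some (List.replicate pre.length f ++ f :: t) := by
    unfold pad_both_sides_alt
    rw [pvFind_split pre rest f hpre hf]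
    show some (pvFillB f (pre ++ f :: rest)) = _
    rw [pvFillB_nn_prefix f pre (f :: rest) hpre]
    have : pvFillB f (f :: rest) = f :: pvFillB f rest := by
      simp [pvFillB, show ¬ f = ((none, none) : Option Int × Option Int) from hf]
    simp [this, ht]
  rw [hA, hB]

-- ===== VERDICT (by name: the statement is the Claim_ definition above) =====
theorem pad_both_sides_spec : Claim_equal_pad_both_sides := by
  intro arr _ hpre
  exact pad_main arr hpre
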